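-- pv_equiv track=rewrite | github.com/trumpetarn/AdventOfCode | 2024/day21.py | npad_to_arrow
-- ===== SOURCE A (Python) =====
-- NPAD = [['7', '8', '9'],['4', '5', '6'],['1', '2', '3'], ['', '0', 'A']]
--
-- def npad_to_arrow(p1, p2) -> str:
--     if p1 == p2:
--         return "A"
--     for i, row in enumerate(NPAD):
--         if p1 in row:
--             r1 = (i, row.index(p1))
--         if p2 in row:
--             r2 = (i, row.index(p2))
--     s = ""
--     # Always move right first to avoid pointing towards "void"
--     if max(r1[0], r2[0]) == 3 and min(r1[1], r2[1]) == 0: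
--         if r1[0] > r2[0]:
--             s += "^"*abs(r1[0]-r2[0])
--         if r1[1] < r2[1]:
--             s += ">"*abs(r1[1]-r2[1])
--         if r1[1] > r2[1]:
--             s += "<"*abs(r1[1]-r2[1])
--         if r1[0] < r2[0]:
--             s += "v"*abs(r1[0]-r2[0])
--     else: # If no risk of pointing towards void, end as close to 'A' as possible
--         if r1[1] > r2[1]:
--             s += "<"*abs(r1[1]-r2[1])
--         if r1[0] < r2[0]:
--             s += "v"*abs(r1[0]-r2[0])
--         if r1[1] < r2[1]:
--             s += ">"*abs(r1[1]-r2[1])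
--         if r1[0] > r2[0]:
--             s += "^"*abs(r1[0]-r2[0])
--     return s+"A"
-- ===== SOURCE B (Python) =====
-- STEPS = {'^': (-1, 0), 'v': (1, 0), '<': (0, -1), '>': (0, 1)}
--
-- def _pos(k):
--     # numeric keypad geometry, computed arithmetically from the key
--     if k == 'A':
--         return (3, 2)
--     d = int(k)               # ValueError on non-digit keys (off the pad)
--     if d == 0:
--         return (3, 1)
--     return (3 - (d + 2) // 3, (d - 1) % 3)
--
-- def npad_to_arrow(p1, p2) -> str:
--     if p1 == p2:
--         return "A"
--     r, c = _pos(p1)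
--     r2, c2 = _pos(p2)
--     # fixed per-call direction priority; the void corner forces up-before-left
--     order = "^><v" if max(r, r2) == 3 and min(c, c2) == 0 else "<v>^"
--     out = []
--     while (r, c) != (r2, c2):
--         for a in order:
--             dr, dc = STEPS[a]
--             if (dr and (r2 - r) * dr > 0) or (dc and (c2 - c) * dc > 0):
--                 out.append(a)
--                 r += dr
--                 c += dc
--                 break
--     return "".join(out) + "A"
-- ===== Notes on version B (the rewrite author's own statement) =====
-- stated objective: alternative
-- what changed: Replaces the pad-table row-scan and the eight conditional segment appends by an arithmetic digit-to-coordinate formula and a greedy one-cell-at-a-time walker that appends one arrow per step, picking each step from a fixed direction-priority list.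
-- outside the precondition, e.g. on npad_to_arrow('', '7'): A returns '^^^A', B raises ValueError; on npad_to_arrow('7', ''): A returns 'vvvA', B raises ValueError
import Mathlib
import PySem

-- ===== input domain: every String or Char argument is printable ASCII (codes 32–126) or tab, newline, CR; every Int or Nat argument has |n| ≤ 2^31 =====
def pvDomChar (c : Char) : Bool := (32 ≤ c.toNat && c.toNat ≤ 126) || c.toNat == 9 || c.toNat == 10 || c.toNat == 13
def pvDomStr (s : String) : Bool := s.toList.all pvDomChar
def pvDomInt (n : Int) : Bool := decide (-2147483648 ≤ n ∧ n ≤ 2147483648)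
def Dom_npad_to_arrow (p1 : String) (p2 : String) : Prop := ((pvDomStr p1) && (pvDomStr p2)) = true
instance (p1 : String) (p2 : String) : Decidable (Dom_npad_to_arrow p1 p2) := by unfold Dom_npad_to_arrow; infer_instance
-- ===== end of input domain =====

-- B drops A's pad-table scan and segment appends for an arithmetic digit→coordinate formula
-- and a greedy one-cell-at-a-time walker driven by a fixed direction-priority list (alternative).

-- ===== PORT A =====
def pvNPAD : List (List String) :=
  [["7", "8", "9"], ["4", "5", "6"], ["1", "2", "3"], ["", "0", "A"]]

def npad_to_arrow (p1 : String) (p2 : String) : String :=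
  if p1 = p2 then "A" else
  -- for i, row in enumerate(NPAD): if p1 in row: r1 = (i, row.index(p1)); if p2 in row: …
  let st : Option (Int × Int) × Option (Int × Int) :=
    (PySem.List.enumerate pvNPAD 0).foldl
      (fun acc ir =>
        -- row.index(p) is guarded by 'p in row', so index? is some there; getD 0 is exact
        let acc := if p1 ∈ ir.2 then
            (some (ir.1, (((PySem.List.index? ir.2 p1).getD 0 : Nat) : Int)), acc.2) else acc
        if p2 ∈ ir.2 then
            (acc.1, some (ir.1, (((PySem.List.index? ir.2 p2).getD 0 : Nat) : Int))) else acc)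
      (none, none)
  match st with
  | (some r1, some r2) =>
    let s : String := ""
    let s : String :=
      if max r1.1 r2.1 = 3 ∧ min r1.2 r2.2 = 0 then
        let s := if r1.1 > r2.1 then s ++ String.ofList (List.replicate (r1.1 - r2.1).natAbs '^') else s
        let s := if r1.2 < r2.2 then s ++ String.ofList (List.replicate (r1.2 - r2.2).natAbs '>') else s
        let s := if r1.2 > r2.2 then s ++ String.ofList (List.replicate (r1.2 - r2.2).natAbs '<') else s
        if r1.1 < r2.1 then s ++ String.ofList (List.replicate (r1.1 - r2.1).natAbs 'v') else s
      else
        let s := if r1.2 > r2.2 then s ++ String.ofList (List.replicate (r1.2 - r2.2).natAbs '<') else s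
        let s := if r1.1 < r2.1 then s ++ String.ofList (List.replicate (r1.1 - r2.1).natAbs 'v') else s
        let s := if r1.2 < r2.2 then s ++ String.ofList (List.replicate (r1.2 - r2.2).natAbs '>') else s
        if r1.1 > r2.1 then s ++ String.ofList (List.replicate (r1.1 - r2.1).natAbs '^') else s
    s ++ "A"
  | _ => ""  -- Python raises UnboundLocalError here; excluded by Pre_

-- ===== PORT B =====
-- STEPS = {'^': (-1,0), 'v': (1,0), '<': (0,-1), '>': (0,1)} (lookup on the four arrow chars)
def pvStep (a : Char) : Int × Int :=
  if a = '^' then (-1, 0) else if a = 'v' then (1, 0)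
  else if a = '<' then (0, -1) else (0, 1)

-- _pos: arithmetic keypad geometry; none = Python's ValueError on int(k)
def pvPos? (k : String) : Option (Int × Int) :=
  if k = "A" then some (3, 2) else
  match PySem.Int.ofStr? k with
  | none => none
  | some d =>
    if d = 0 then some (3, 1)
    else some (3 - PySem.Int.floordiv (d + 2) 3, PySem.Int.mod (d - 1) 3)

-- the while loop; fuel bounds the number of iterations (each step moves one cell toward the target)
def pvWalk : Nat → Int → Int → Int → Int → List Char → List Char
  | 0, _, _, _, _, _ => []
  | fuel + 1, r, c, r2, c2, order =>
    if r = r2 ∧ c = c2 then []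
    else
      match order.find? (fun a =>
          let d := pvStep a
          decide ((d.1 ≠ 0 ∧ (r2 - r) * d.1 > 0) ∨ (d.2 ≠ 0 ∧ (c2 - c) * d.2 > 0))) with
      | some a =>
        let d := pvStep a
        a :: pvWalk fuel (r + d.1) (c + d.2) r2 c2 order
      | none => []  -- unreachable: some direction always points toward an unequal target

def npad_to_arrow_alt (p1 : String) (p2 : String) : String :=
  if p1 = p2 then "A" else
  match pvPos? p1 with
  | none => ""  -- Python raises ValueError here; excluded by Pre_
  | some rc1 =>
  match pvPos? p2 with
  | none => ""  -- Python raises ValueError here; excluded by Pre_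
  | some rc2 =>
    let r := rc1.1; let c := rc1.2
    let r2 := rc2.1; let c2 := rc2.2
    let order := if max r r2 = 3 ∧ min c c2 = 0 then "^><v".toList else "<v>^".toList
    String.ofList (pvWalk ((r2 - r).natAbs + (c2 - c).natAbs) r c r2 c2 order) ++ "A"

-- ===== PRECONDITION & SPEC =====
def pvKeys : List String := ["7", "8", "9", "4", "5", "6", "1", "2", "3", "0", "A"]

-- Pre_ excludes unequal inputs with a key outside the eleven pad keys: off-pad keys generally make A
-- raise UnboundLocalError, and the empty string '' accidentally matches the blank void placeholder in
-- A's pad table (an artefact of the implementation); B raises ValueError there.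
def Pre_npad_to_arrow (p1 : String) (p2 : String) : Prop :=
  p1 = p2 ∨ (p1 ∈ pvKeys ∧ p2 ∈ pvKeys)
instance (p1 : String) (p2 : String) : Decidable (Pre_npad_to_arrow p1 p2) := by
  unfold Pre_npad_to_arrow; infer_instance

def pvWitness_npad_to_arrow : String × String := ("0", "7")

def Spec_npad_to_arrow (p1 : String) (p2 : String) (out : String) : Prop := out = npad_to_arrow_alt p1 p2
instance (p1 : String) (p2 : String) (out : String) : Decidable (Spec_npad_to_arrow p1 p2 out) := by unfold Spec_npad_to_arrow; infer_instance

-- ===== CLAIM =====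
def Claim_equal_npad_to_arrow : Prop := ∀ (p1 : String) (p2 : String), Dom_npad_to_arrow p1 p2 → Pre_npad_to_arrow p1 p2 → Spec_npad_to_arrow p1 p2 (npad_to_arrow p1 p2)

-- ===== LEMMAS AND PROOFS =====

-- ===== VERDICT =====
theorem npad_to_arrow_spec : Claim_equal_npad_to_arrow := by
  intro p1 p2 _ hpre
  unfold Spec_npad_to_arrow
  rcases hpre with rfl | ⟨h1, h2⟩
  · simp [npad_to_arrow, npad_to_arrow_alt]
  · fin_cases h1 <;> fin_cases h2 <;> decide
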